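-- pv_equiv track=rewrite | github.com/henrychh06/text2cad_medium | cad_processing/utils/utils.py | merge_end_tokens_from_loop
-- ===== SOURCE A (Python) =====
-- def merge_end_tokens_from_loop(vec):
--     """Merge tokens with end tokens."""
--     result = []
--     temp = []
--
--     for item in vec:
--         if isinstance(item, list) and item[0] >= 5:  # END_CURVE or higher
--             if temp:
--                 result.append(temp)
--                 temp = []
--         else:
--             temp.append(item)
--
--     if temp:
--         result.append(temp)
--
--     return result, vec
-- ===== SOURCE B (Python) =====
-- def merge_end_tokens_from_loop(vec):
--     """Merge tokens with end tokens."""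
--     # two-pointer span scan: skip separators, otherwise find the end of the
--     # maximal run of non-separator tokens and slice it out in one piece
--     result = []
--     i, n = 0, len(vec)
--     while i < n:
--         item = vec[i]
--         if isinstance(item, list) and item[0] >= 5:
--             i += 1
--             continue
--         j = i + 1
--         while j < n and not (isinstance(vec[j], list) and vec[j][0] >= 5):
--             j += 1
--         result.append(vec[i:j])
--         i = j
--     return result, vec
-- ===== Notes on version B (the rewrite author's own statement) =====
-- stated objective: alternative
-- what changed: Replaced A's single accumulator loop carrying (result, temp) state by a recursive span decomposition that peels one maximal run of non-separator tokens at a time (takeWhile/dropWhile style), so no temp buffer or trailing flush is needed.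
import Mathlib
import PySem

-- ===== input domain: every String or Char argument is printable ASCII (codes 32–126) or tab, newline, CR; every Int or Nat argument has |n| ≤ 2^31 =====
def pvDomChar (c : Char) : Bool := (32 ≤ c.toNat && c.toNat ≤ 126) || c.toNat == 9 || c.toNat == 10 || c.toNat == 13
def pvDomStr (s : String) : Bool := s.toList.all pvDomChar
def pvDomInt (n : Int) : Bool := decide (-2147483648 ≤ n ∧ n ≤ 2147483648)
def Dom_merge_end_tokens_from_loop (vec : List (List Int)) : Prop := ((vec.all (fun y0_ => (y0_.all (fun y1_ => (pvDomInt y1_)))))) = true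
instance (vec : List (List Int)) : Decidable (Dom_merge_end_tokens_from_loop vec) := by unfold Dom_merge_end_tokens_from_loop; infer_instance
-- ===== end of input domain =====

-- B replaces A's accumulator loop (result, temp buffer, trailing flush) by a two-pointer
-- span scan that slices out each maximal run of non-separator tokens; alternative, same cost.


-- ===== PORT A =====
-- 'isinstance(item, list)' is always true under the type convention; 'item[0]' on an
-- empty item raises IndexError in Python, excluded by Pre_; headD 0 is exact on nonempty items.
def pvHead (item : List Int) : Int := item.headD 0   -- item[0] (nonempty under Pre_)

def pvAStep (st : List (List (List Int)) × List (List Int)) (item : List Int) :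
    List (List (List Int)) × List (List Int) :=
  if 5 ≤ pvHead item then
    if st.2 ≠ [] then (st.1 ++ [st.2], []) else st
  else (st.1, st.2 ++ [item])

def merge_end_tokens_from_loop (vec : List (List Int)) :
    List (List (List Int)) × List (List Int) :=
  let st := vec.foldl pvAStep ([], [])
  ((if st.2 ≠ [] then st.1 ++ [st.2] else st.1), vec)

-- ===== PORT B =====
-- separator test: item[0] >= 5 (item nonempty under Pre_)
def pvSep (item : List Int) : Bool := 5 ≤ pvHead item

-- inner while loop: advance j past non-separator tokens
-- (fuel = vec.length is a totality guard only: j advances once per unit of fuel)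
def pvScanEndF (vec : List (List Int)) : Nat → Nat → Nat
  | 0, j => j
  | f + 1, j =>
    if j < vec.length then
      if pvSep (vec.getD j []) then j else pvScanEndF vec f (j + 1)
    else j

-- outer while loop over the index i; vec[i:j] is (drop i).take (j-i) for 0 ≤ i ≤ j
-- (fuel = vec.length is a totality guard only: i advances at least once per unit of fuel)
def pvOuterF (vec : List (List Int)) : Nat → Nat → List (List (List Int))
  | 0, _ => []
  | f + 1, i =>
    if i < vec.length then
      if pvSep (vec.getD i []) then pvOuterF vec f (i + 1)
      else
        let j := pvScanEndF vec vec.length (i + 1)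
        ((vec.drop i).take (j - i)) :: pvOuterF vec f j
    else []

def merge_end_tokens_from_loop_alt (vec : List (List Int)) :
    List (List (List Int)) × List (List Int) :=
  (pvOuterF vec vec.length 0, vec)

-- ===== PRECONDITION & SPEC =====
-- Pre_ excludes exactly the inputs containing an empty sub-list, on which Python A
-- (and Python B) raises IndexError at 'item[0]'.
def Pre_merge_end_tokens_from_loop (vec : List (List Int)) : Prop :=
  ∀ item ∈ vec, item ≠ []
instance (vec : List (List Int)) : Decidable (Pre_merge_end_tokens_from_loop vec) := by
  unfold Pre_merge_end_tokens_from_loop; infer_instance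
def pvWitness_merge_end_tokens_from_loop : List (List Int) := [[6, 1], [1, 2], [2], [7], [3]]

def Spec_merge_end_tokens_from_loop (vec : List (List Int))
    (out : List (List (List Int)) × List (List Int)) : Prop :=
  out = merge_end_tokens_from_loop_alt vec
instance (vec : List (List Int)) (out : List (List (List Int)) × List (List Int)) :
    Decidable (Spec_merge_end_tokens_from_loop vec out) := by
  unfold Spec_merge_end_tokens_from_loop; infer_instance

-- ===== CLAIM (what is proved, stated in full; the proofs are below) =====
def Claim_equal_merge_end_tokens_from_loop : Prop :=
  ∀ (vec : List (List Int)), Dom_merge_end_tokens_from_loop vec →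
    Pre_merge_end_tokens_from_loop vec →
    Spec_merge_end_tokens_from_loop vec (merge_end_tokens_from_loop vec)

-- ===== LEMMAS AND PROOFS =====

-- the common span decomposition both ports compute
def pvSplit : List (List Int) → List (List (List Int))
  | [] => []
  | x :: rest =>
    if pvSep x then pvSplit rest
    else (x :: rest.takeWhile (fun y => !pvSep y)) :: pvSplit (rest.dropWhile (fun y => !pvSep y))
termination_by xs => xs.length
decreasing_by
  · simp
  · have := List.length_dropWhile_le (p := fun y => !pvSep y) (l := rest); simp; omega

-- A's loop with state (result, temp), expressed directly
def pvG : List (List Int) → List (List Int) → List (List (List Int))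
  | temp, [] => if temp = [] then [] else [temp]
  | temp, x :: xs =>
    if pvSep x then (if temp = [] then pvG [] xs else temp :: pvG [] xs)
    else pvG (temp ++ [x]) xs

theorem pvFold_eq_pvG (xs : List (List Int)) :
    ∀ (result : List (List (List Int))) (temp : List (List Int)),
      (if (xs.foldl pvAStep (result, temp)).2 ≠ [] then
          (xs.foldl pvAStep (result, temp)).1 ++ [(xs.foldl pvAStep (result, temp)).2]
        else (xs.foldl pvAStep (result, temp)).1) = result ++ pvG temp xs := by
  induction xs with
  | nil =>
    intro result temp
    by_cases h : temp = [] <;> simp [pvG, h]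
  | cons x xs ih =>
    intro result temp
    by_cases hs : pvSep x
    · have hs' : (5:Int) ≤ pvHead x := by simpa [pvSep] using hs
      by_cases ht : temp = []
      · simp [pvG, hs, ht, pvAStep, hs', ih]
      · simp [pvG, hs, ht, pvAStep, hs', ih, List.append_assoc]
    · have hs' : ¬ (5:Int) ≤ pvHead x := by simpa [pvSep] using hs
      simp [pvG, hs, pvAStep, hs', ih]

theorem pvG_eq_pvSplit (xs : List (List Int)) :
    (∀ temp, temp ≠ [] →
        pvG temp xs = (temp ++ xs.takeWhile (fun y => !pvSep y)) ::
          pvSplit (xs.dropWhile (fun y => !pvSep y))) ∧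
      pvG [] xs = pvSplit xs := by
  induction xs with
  | nil =>
    constructor
    · intro temp ht; simp [pvG, pvSplit, ht]
    · simp [pvG, pvSplit]
  | cons x xs ih =>
    obtain ⟨ihP, ihQ⟩ := ih
    constructor
    · intro temp ht
      by_cases hs : pvSep x
      · simp [pvG, hs, ht, ihQ, pvSplit]
      · rw [pvG]
        simp only [hs]
        rw [ihP (temp ++ [x]) (by simp)]
        simp [hs]
    · by_cases hs : pvSep x
      · simp [pvG, hs, ihQ, pvSplit]
      · have hs0 : pvSep x = false := by simpa using hs
        rw [pvG]
        simp only [hs0, Bool.false_eq_true, if_false, List.nil_append]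
        rw [ihP [x] (by simp)]
        simp [pvSplit, hs0]

theorem pvTakeLen {α : Type} (p : α → Bool) (l : List α) :
    l.take (l.takeWhile p).length = l.takeWhile p :=
  (List.prefix_iff_eq_take.mp (List.takeWhile_prefix p)).symm

theorem pvDropLen {α : Type} (p : α → Bool) (l : List α) :
    l.drop (l.takeWhile p).length = l.dropWhile p := by
  nth_rewrite 2 [← List.takeWhile_append_dropWhile (p := p) (l := l)]
  rw [List.drop_left]

-- inner scan characterisation
theorem pvScanEndF_eq (vec : List (List Int)) :
    ∀ (f j : Nat), vec.length ≤ j + f →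
      pvScanEndF vec f j = j + ((vec.drop j).takeWhile (fun y => !pvSep y)).length := by
  intro f
  induction f with
  | zero =>
    intro j hf
    have hnil : vec.drop j = [] := List.drop_eq_nil_of_le (by omega)
    simp [pvScanEndF, hnil]
  | succ f ih =>
    intro j hf
    by_cases h : j < vec.length
    · have hg : vec.getD j [] = vec[j] := List.getD_eq_getElem vec [] h
      have hd : vec.drop j = vec[j] :: vec.drop (j + 1) := List.drop_eq_getElem_cons h
      by_cases hs : pvSep (vec.getD j []) = true
      · have hps : pvSep vec[j] = true := by rw [← hg]; exact hs
        rw [pvScanEndF, if_pos h, if_pos hs, hd,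
          List.takeWhile_cons_of_neg (by simp [hps])]
        simp
      · have hps : pvSep vec[j] = false := by rw [← hg]; simpa using hs
        rw [pvScanEndF, if_pos h, if_neg hs, ih (j + 1) (by omega), hd,
          List.takeWhile_cons_of_pos (by simp [hps])]
        simp only [List.length_cons]
        omega
    · have hnil : vec.drop j = [] := List.drop_eq_nil_of_le (by omega)
      rw [pvScanEndF, if_neg h, hnil]
      simp

theorem pvOuterF_eq (vec : List (List Int)) :
    ∀ (f i : Nat), vec.length ≤ i + f →
      pvOuterF vec f i = pvSplit (vec.drop i) := by
  intro f
  induction f with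
  | zero =>
    intro i hf
    have hnil : vec.drop i = [] := List.drop_eq_nil_of_le (by omega)
    simp [pvOuterF, hnil, pvSplit]
  | succ f ih =>
    intro i hf
    by_cases h : i < vec.length
    · have hg : vec.getD i [] = vec[i] := List.getD_eq_getElem vec [] h
      have hd : vec.drop i = vec[i] :: vec.drop (i + 1) := List.drop_eq_getElem_cons h
      by_cases hs : pvSep (vec.getD i []) = true
      · have hps : pvSep vec[i] = true := by rw [← hg]; exact hs
        rw [pvOuterF, if_pos h, if_pos hs, ih (i + 1) (by omega), hd, pvSplit]
        simp [hps]
      · have hps : pvSep vec[i] = false := by rw [← hg]; simpa using hs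
        have hj : pvScanEndF vec vec.length (i + 1) =
            i + 1 + ((vec.drop (i + 1)).takeWhile (fun y => !pvSep y)).length :=
          pvScanEndF_eq vec vec.length (i + 1) (by omega)
        rw [pvOuterF, if_pos h, if_neg hs]
        show List.take (pvScanEndF vec vec.length (i + 1) - i) (List.drop i vec) ::
            pvOuterF vec f (pvScanEndF vec vec.length (i + 1)) = pvSplit (List.drop i vec)
        rw [ih (pvScanEndF vec vec.length (i + 1)) (by rw [hj]; omega), hj, hd, pvSplit]
        simp only [hps, Bool.false_eq_true, if_false]
        congr 1
        · have h5 : i + 1 + ((vec.drop (i + 1)).takeWhile (fun y => !pvSep y)).length - i =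
              ((vec.drop (i + 1)).takeWhile (fun y => !pvSep y)).length + 1 := by omega
          rw [h5, List.take_succ_cons, pvTakeLen]
        · congr 1
          have h6 : vec.drop (i + 1 + ((vec.drop (i + 1)).takeWhile (fun y => !pvSep y)).length) =
              (vec.drop (i + 1)).drop ((vec.drop (i + 1)).takeWhile (fun y => !pvSep y)).length := by
            rw [List.drop_drop]
          rw [h6, pvDropLen]
    · have hnil : vec.drop i = [] := List.drop_eq_nil_of_le (by omega)
      rw [pvOuterF, if_neg h, hnil, pvSplit]

-- ===== VERDICT (by name: the statement is the Claim_ definition above) =====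
theorem merge_end_tokens_from_loop_spec : Claim_equal_merge_end_tokens_from_loop := by
  intro vec _ _
  unfold Spec_merge_end_tokens_from_loop merge_end_tokens_from_loop merge_end_tokens_from_loop_alt
  have h1 := pvFold_eq_pvG vec [] []
  have h2 := (pvG_eq_pvSplit vec).2
  have h3 := pvOuterF_eq vec vec.length 0 (by omega)
  simp only [List.drop_zero] at h3
  simp only [h3, ← h2, List.nil_append] at *
  exact Prod.ext h1 rfl
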